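-- pv_equiv track=rewrite | github.com/koii-network/prometheus-beta | src/find_smallest_multiple.py | find_smallest_multiple_of_five
-- ===== SOURCE A (Python) =====
-- def find_smallest_multiple_of_five(arr):
--     """
--     Find the smallest positive integer that, when added to the sum of all numbers
--     in the array, results in a multiple of 5.
--
--     Args:
--         arr (list): A list of integers
--
--     Returns:
--         int: The smallest positive integer that makes the sum a multiple of 5
--
--     Raises:
--         TypeError: If input is not a list
--         ValueError: If list contains non-integer elements
--     """
--     # Input validation
--     if not isinstance(arr, list):
--         raise TypeError("Input must be a list")
--
--     if not all(isinstance(x, int) for x in arr):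
--         raise ValueError("All elements must be integers")
--
--     # Calculate the current sum of the array
--     current_sum = sum(arr)
--
--     # Find the smallest positive integer to make the sum a multiple of 5
--     for i in range(1, 6):  # We only need to check up to 5
--         if (current_sum + i) % 5 == 0:
--             return i
--
--     # This should never happen, but included for completeness
--     return 5
-- ===== SOURCE B (Python) =====
-- def find_smallest_multiple_of_five(arr):
--     """
--     Find the smallest positive integer that, when added to the sum of all numbers
--     in the array, results in a multiple of 5.
--     """
--     if not isinstance(arr, list):
--         raise TypeError("Input must be a list")
--     if not all(isinstance(x, int) for x in arr):
--         raise ValueError("All elements must be integers")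
--     # closed form: the deficit to the next multiple of 5, with 5 instead of 0
--     return ((-sum(arr)) % 5) or 5
-- ===== Notes on version B (the rewrite author's own statement) =====
-- stated objective: simpler
-- what changed: Replaces the candidate scan over range(1,6) with a single closed-form modular computation ((-sum) % 5) or 5.
import Mathlib
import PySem

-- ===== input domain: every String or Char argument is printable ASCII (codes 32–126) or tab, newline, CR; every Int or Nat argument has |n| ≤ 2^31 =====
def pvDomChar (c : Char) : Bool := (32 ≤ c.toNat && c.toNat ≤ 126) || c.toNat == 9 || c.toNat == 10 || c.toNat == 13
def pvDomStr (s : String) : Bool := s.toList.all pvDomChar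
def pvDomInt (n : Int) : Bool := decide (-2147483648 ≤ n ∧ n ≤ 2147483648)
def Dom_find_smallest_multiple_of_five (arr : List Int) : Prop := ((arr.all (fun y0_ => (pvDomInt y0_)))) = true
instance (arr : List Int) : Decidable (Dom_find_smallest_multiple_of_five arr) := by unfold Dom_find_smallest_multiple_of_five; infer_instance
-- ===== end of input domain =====

-- B replaces A's scan over range(1,6) with the closed form ((-sum) % 5) or 5 ('simpler').

-- ===== PORT A =====
-- the 'for i in range(1, 6)' loop: return the first i with (current_sum + i) % 5 == 0, else 5
def pvLoopA (current_sum : Int) : List Int → Int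
  | [] => 5
  | i :: rest => if PySem.Int.mod (current_sum + i) 5 = 0 then i else pvLoopA current_sum rest

def find_smallest_multiple_of_five (arr : List Int) : Int :=
  let current_sum := arr.foldl (· + ·) 0
  pvLoopA current_sum (PySem.List.pyRange 1 6 1)

-- ===== PORT B =====
def find_smallest_multiple_of_five_alt (arr : List Int) : Int :=
  let r := PySem.Int.mod (-(arr.foldl (· + ·) 0)) 5
  if r = 0 then 5 else r   -- Python's '… or 5'

-- ===== PRECONDITION & SPEC =====
def Spec_find_smallest_multiple_of_five (arr : List Int) (out : Int) : Prop := out = find_smallest_multiple_of_five_alt arr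
instance (arr : List Int) (out : Int) : Decidable (Spec_find_smallest_multiple_of_five arr out) := by unfold Spec_find_smallest_multiple_of_five; infer_instance

-- ===== CLAIM (what is proved, stated in full; the proofs are below) =====
def Claim_equal_find_smallest_multiple_of_five : Prop := ∀ (arr : List Int), Dom_find_smallest_multiple_of_five arr → Spec_find_smallest_multiple_of_five arr (find_smallest_multiple_of_five arr)

-- ===== LEMMAS AND PROOFS =====

theorem pv_core (s : Int) :
    pvLoopA s (PySem.List.pyRange 1 6 1) =
      (if PySem.Int.mod (-s) 5 = 0 then 5 else PySem.Int.mod (-s) 5) := by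
  have hr : PySem.List.pyRange 1 6 1 = [1, 2, 3, 4, 5] := by decide
  rw [hr]
  simp only [pvLoopA, PySem.Int.mod_eq_emod_of_pos (b := 5) (by norm_num)]
  split_ifs <;> omega

-- ===== VERDICT (by name: the statement is the Claim_ definition above) =====
theorem find_smallest_multiple_of_five_spec : Claim_equal_find_smallest_multiple_of_five := by
  intro arr _
  unfold Spec_find_smallest_multiple_of_five find_smallest_multiple_of_five find_smallest_multiple_of_five_alt
  exact pv_core _
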